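-- pv_equiv track=rewrite | github.com/al-ramsey/aoc_2024 | 7.py | vals
-- ===== SOURCE A (Python) =====
-- def base3(n):
--     # change base 10 to base 3
--     i = 0
--     n3 = "0t"
--     while 3**i < n:
--         i += 1
--     if 3**i != n:
--         i -= 1
--     for j in range(i+1):
--         k = i-j
--
--         if 2*(3**k) <= n:
--             n3 += "2"
--             n -= 2*(3**k)
--         elif 3**k <= n:
--             n3 += "1"
--             n -= 3**k
--         else:
--             n3 += "0"
--
--     return n3
--
-- def zero_padder(el, length):
--     # pad zeroes so that all the binary/tertiary numbers are the same number of digits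
--     while len(el) < length:
--         el = "0" + el
--
--     return el
--
-- def vals(length, base):
--     # create list of all binary/tertiary numbers of a certain length
--     upper = 0
--     l = []
--     upper = base**length - 1
--     for j in range(upper+1):
--
--         if base == 2:
--             power = zero_padder(str(bin(j))[2:], len(str(bin(upper))[2:]))
--         elif base == 3:
--             power = zero_padder(str(base3(j))[2:], len(str(base3(upper))[2:]))
--         else:
--             return "invalid"
--         l.append(power)
--
--     return l
-- ===== SOURCE B (Python) =====
-- def vals(length, base):
--     # all `length`-digit numbers in the given base, zero-padded, in increasing order
--     out = []
--     for j in range(base ** length):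
--         s = ""
--         n = j
--         while n:
--             n, r = divmod(n, base)
--             s = chr(ord('0') + r) + s
--         out.append(s.zfill(length))
--     return out
-- ===== Notes on version B (the rewrite author's own statement) =====
-- stated objective: simpler
-- what changed: B is a single base-generic loop: a standard divmod digit loop plus str.zfill to the constant width `length`, replacing A's per-base dispatch, greedy highest-power-of-3-subtraction converter (with its power-search while loop), one-character-at-a-time zero_padder and per-iteration recomputation of len(bin/base3(upper)); Pre_ excludes negative lengths (A raises TypeError on range of a float) and bases outside {2,3} with base**length > 0, where A returns the string 'invalid' - not a list.
-- intended difference: For length 0 with base 2, A returns ['0'] (bin(0) is '0' and sets the pad width to 1, inconsistently with A's own base-3 result ['']), while B returns [''] - the one empty string of length 0 - which is the intended 'all numbers of the given length'. — e.g. on vals(0, 2): A returns ["0"], B returns [""]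
-- outside the precondition, e.g. on vals(1, 5): A returns 'invalid', B returns ['0', '1', '2', '3', '4']
import Mathlib
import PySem

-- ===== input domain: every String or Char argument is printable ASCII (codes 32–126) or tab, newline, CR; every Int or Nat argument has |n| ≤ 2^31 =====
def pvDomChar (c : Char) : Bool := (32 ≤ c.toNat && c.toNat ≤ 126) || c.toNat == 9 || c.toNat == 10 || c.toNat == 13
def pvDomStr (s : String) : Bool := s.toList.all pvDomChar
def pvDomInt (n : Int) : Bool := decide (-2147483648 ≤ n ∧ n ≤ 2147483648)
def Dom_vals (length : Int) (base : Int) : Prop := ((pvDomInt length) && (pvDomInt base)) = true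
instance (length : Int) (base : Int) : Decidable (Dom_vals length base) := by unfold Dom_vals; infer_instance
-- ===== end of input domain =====

-- B: divmod digit loop + zfill to the constant width `length` instead of A's greedy
-- highest-power-of-3 subtraction, char-by-char zero_padder and per-iteration width recomputation.
-- Strings are handled as code-point lists (List Char) per the PySem convention.


-- ===== PORT A =====
-- shared port of the builtin bin(j)[2:] for j ≥ 0 (exact: binary digits, MSB first, "0" for 0)
def pyBinDigits : Nat → List Char
  | 0 => []
  | n+1 => pyBinDigits ((n+1)/2) ++ [if (n+1) % 2 = 1 then '1' else '0']
decreasing_by exact Nat.div_lt_self (Nat.succ_pos n) (by norm_num)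

def pyBin (n : Nat) : List Char := if n = 0 then ['0'] else pyBinDigits n

-- A's `while 3**i < n: i += 1`
def base3FindI (n : Int) (i : Nat) : Nat :=
  if (3:Int)^i < n then base3FindI n (i+1) else i
termination_by (n.toNat - 3^i : Nat)
decreasing_by
  have h1 : ((3:Nat)^i : Int) < n := by omega
  have h2 : (3:Nat)^i < n.toNat := by omega
  have h3 : (3:Nat)^i < 3^(i+1) := Nat.pow_lt_pow_succ (by norm_num)
  omega

-- A's `for j in range(i+1): k = i-j; ...` — count = remaining iterations, k = current power
def base3Go (n : Int) (k : Int) : Nat → List Char → List Char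
  | 0, acc => acc
  | c+1, acc =>
    if 2*(3:Int)^k.toNat ≤ n then base3Go (n - 2*(3:Int)^k.toNat) (k-1) c (acc ++ ['2'])
    else if (3:Int)^k.toNat ≤ n then base3Go (n - (3:Int)^k.toNat) (k-1) c (acc ++ ['1'])
    else base3Go n (k-1) c (acc ++ ['0'])

def base3 (n : Int) : List Char :=
  let i0 := base3FindI n 0
  let i : Int := if (3:Int)^i0 ≠ n then (i0:Int) - 1 else (i0:Int)
  base3Go n i (i+1).toNat ['0','t']

def zero_padder (el : List Char) (length : Int) : List Char :=
  if (el.length : Int) < length then zero_padder ('0' :: el) length else el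
termination_by (length - el.length).toNat
decreasing_by simp; omega

def valsLoop (base upper : Int) : List Int → List String → List String
  | [], acc => acc
  | j :: js, acc =>
    if base = 2 then
      valsLoop base upper js (acc ++ [String.ofList (zero_padder (pyBin j.toNat)
        ((pyBin upper.toNat).length : Int))])
    else if base = 3 then
      valsLoop base upper js (acc ++ [String.ofList (zero_padder
        (PySem.List.slice (base3 j) (some 2) none)
        ((PySem.List.slice (base3 upper) (some 2) none).length : Int))])
    else ["invalid"]  -- Python returns the string "invalid" (not a list); excluded by Pre_vals

def vals (length : Int) (base : Int) : List String :=
  let upper := base ^ length.toNat - 1  -- base**length; Pre_vals demands 0 ≤ length (else Python raises)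
  valsLoop base upper (PySem.List.pyRange 0 (upper+1) 1) []

-- ===== PORT B =====
-- port of chr(ord('0') + r)
def dch (r : Nat) : Char := Char.ofNat ('0'.toNat + r)

-- Source B's `while n: n, r = divmod(n, base); s = chr(ord('0') + r) + s`
-- (fuel makes the recursion total for every Int base; n+1 steps always suffice when the
--  Python loop terminates, since each step at least halves a positive n for base >= 2)
def dgen (base : Int) : Nat → Int → List Char → List Char
  | 0, _, s => s
  | f+1, n, s =>
    if n = 0 then s
    else dgen base f (PySem.Int.floordiv n base) (dch (PySem.Int.mod n base).toNat :: s)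

def vals_alt (length : Int) (base : Int) : List String :=
  (PySem.List.pyRange 0 (base ^ length.toNat) 1).map
    (fun j => String.ofList (PySem.Chars.zfill (dgen base (j.toNat+1) j []) length))

-- ===== PRECONDITION & SPEC =====
-- Pre_ excludes negative lengths (A raises TypeError on range of a float) and bases outside
-- {2,3} whose range is nonempty, where A returns the string "invalid" — not a value of type
-- list. It keeps the bases with base**length <= 0 (stated in closed arithmetic form),
-- where A's loop is empty and it returns [].
def Pre_vals (length : Int) (base : Int) : Prop :=
  0 ≤ length ∧ (base = 2 ∨ base = 3 ∨ (base = 0 ∧ 1 ≤ length) ∨ (base < 0 ∧ length % 2 = 1))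
instance (length : Int) (base : Int) : Decidable (Pre_vals length base) := by
  unfold Pre_vals; infer_instance

def pvWitness_vals : Int × Int := (2, 3)

-- For length 0 with base 2, A returns ["0"] (bin(0) is "0" and sets the pad width to 1,
-- inconsistently with A's own base-3 result [""]), while B returns [""] — the one empty
-- string of length 0 — which is the intended "all numbers of the given length".
def D_vals (length : Int) (base : Int) : Prop := length = 0 ∧ base = 2
instance (length : Int) (base : Int) : Decidable (D_vals length base) := by
  unfold D_vals; infer_instance

def Spec_vals (length : Int) (base : Int) (out : List String) : Prop :=
  ¬ D_vals length base → out = vals_alt length base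
instance (length : Int) (base : Int) (out : List String) : Decidable (Spec_vals length base out) := by
  unfold Spec_vals; infer_instance

def pvDiffWitness_vals : Int × Int := (0, 2)
def pvDiffWitnessOut_vals : (List String) × (List String) := (["0"], [""])

-- ===== CLAIM (what is proved, stated in full; the proofs are below) =====
def Claim_unchanged_vals : Prop := ∀ (length : Int) (base : Int), Dom_vals length base →
  Pre_vals length base → Spec_vals length base (vals length base)
def Claim_changed_vals : Prop :=
  Dom_vals (pvDiffWitness_vals.1) (pvDiffWitness_vals.2) ∧
  Pre_vals (pvDiffWitness_vals.1) (pvDiffWitness_vals.2) ∧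
  D_vals (pvDiffWitness_vals.1) (pvDiffWitness_vals.2) ∧
  vals (pvDiffWitness_vals.1) (pvDiffWitness_vals.2) = pvDiffWitnessOut_vals.1 ∧
  vals_alt (pvDiffWitness_vals.1) (pvDiffWitness_vals.2) = pvDiffWitnessOut_vals.2 ∧
  pvDiffWitnessOut_vals.1 ≠ pvDiffWitnessOut_vals.2
def Claim_exact_vals : Prop := ∀ (length : Int) (base : Int), Dom_vals length base →
  Pre_vals length base → D_vals length base → vals length base ≠ vals_alt length base

-- ===== LEMMAS AND PROOFS =====

-- proof-side digit helpers: '0'+r as a plain if-chain, and the base-3 divmod loop on Nat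
def dchr (r : Nat) : Char := if r = 0 then '0' else if r = 1 then '1' else '2'

def d3 (n : Nat) (s : List Char) : List Char :=
  if n = 0 then s else d3 (n/3) (dchr (n % 3) :: s)
decreasing_by exact Nat.div_lt_self (by omega) (by norm_num)

-- proof-side canonical forms: left-padding with zeros, and fixed-width base-3 digits (MSB first)
def leftpad (w : Nat) (l : List Char) : List Char := List.replicate (w - l.length) '0' ++ l

def padRev : Nat → Nat → List Char
  | 0, _ => []
  | m+1, n => padRev m (n/3) ++ [dchr (n % 3)]

theorem dchr_cases (r : Nat) : dchr r = '0' ∨ dchr r = '1' ∨ dchr r = '2' := by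
  unfold dchr; split_ifs <;> simp

theorem zero_padder_eq (el : List Char) (L : Int) : zero_padder el L = leftpad L.toNat el := by
  fun_induction zero_padder el L with
  | case1 el h ih =>
    rw [ih]
    unfold leftpad
    have h1 : L.toNat - el.length = (L.toNat - ('0'::el).length) + 1 := by simp; omega
    rw [h1, List.replicate_succ']
    simp
  | case2 el h =>
    unfold leftpad
    have h1 : L.toNat - el.length = 0 := by omega
    simp [h1]

theorem zfill_eq (cs : List Char) (w : Int)
    (h : ∀ c ∈ cs, c = '0' ∨ c = '1' ∨ c = '2') :
    PySem.Chars.zfill cs w = leftpad w.toNat cs := by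
  unfold PySem.Chars.zfill leftpad
  split_ifs with h1
  · have : w.toNat - cs.length = 0 := by omega
    simp [this]
  · match cs with
    | [] => simp
    | c :: rest =>
      have hc := h c (by simp)
      have : ¬ (c = '+' ∨ c = '-') := by rcases hc with h|h|h <;> subst h <;> decide
      simp [this]

theorem leftpad_leftpad (l : List Char) {w W : Nat} (h1 : l.length ≤ w) (h2 : w ≤ W) :
    leftpad W (leftpad w l) = leftpad W l := by
  unfold leftpad
  have hlen : (List.replicate (w - l.length) '0' ++ l).length = w := by simp; omega
  rw [hlen, ← List.append_assoc, ← List.replicate_add]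
  congr 2
  omega

theorem padRev_length (m n : Nat) : (padRev m n).length = m := by
  induction m generalizing n with
  | zero => rfl
  | succ m ih => simp [padRev, ih]

theorem padRev_zero (m : Nat) : padRev m 0 = List.replicate m '0' := by
  induction m with
  | zero => rfl
  | succ m ih => rw [padRev, ih]; simp [dchr, List.replicate_succ']

theorem padRev_msb (m n : Nat) (h : n < 3^(m+1)) :
    padRev (m+1) n = dchr (n / 3^m) :: padRev m (n % 3^m) := by
  induction m generalizing n with
  | zero =>
    have h3 : n < 3 := by simpa using h
    simp [padRev, Nat.mod_eq_of_lt h3]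
  | succ m ih =>
    have hdiv : n / 3 < 3^(m+1) := by
      rw [Nat.div_lt_iff_lt_mul (by norm_num)]
      calc n < 3^(m+1+1) := h
        _ = 3^(m+1) * 3 := by ring
    rw [padRev, ih _ hdiv, padRev]
    have e1 : n / 3 / 3^m = n / 3^(m+1) := by
      rw [Nat.div_div_eq_div_mul]; congr 1; ring
    have e2 : n / 3 % 3^m = n % 3^(m+1) / 3 := by
      rw [show (3:Nat)^(m+1) = 3*3^m from by ring, Nat.mod_mul_right_div_self]
    have e3 : n % 3 = n % 3^(m+1) % 3 := by
      rw [Nat.mod_mod_of_dvd _ (dvd_pow_self 3 (Nat.succ_ne_zero m))]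
    rw [e1, e2, e3]
    simp

theorem d3_append (n : Nat) : ∀ s, d3 n s = d3 n [] ++ s := by
  induction n using Nat.strong_induction_on with
  | _ n ih =>
    intro s
    by_cases h : n = 0
    · subst h; simp [d3]
    · have hlt : n / 3 < n := Nat.div_lt_self (by omega) (by norm_num)
      conv_lhs => rw [d3]
      conv_rhs => rw [d3]
      rw [if_neg h, if_neg h, ih _ hlt (dchr (n % 3) :: s), ih _ hlt [dchr (n % 3)]]
      simp

theorem d3_pos (n : Nat) (h : 0 < n) : d3 n [] = d3 (n/3) [] ++ [dchr (n % 3)] := by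
  rw [d3]
  simp only [Nat.pos_iff_ne_zero.mp h, if_false]
  exact d3_append _ _

theorem d3_mem (n : Nat) : ∀ c ∈ d3 n [], c = '0' ∨ c = '1' ∨ c = '2' := by
  induction n using Nat.strong_induction_on with
  | _ n ih =>
    intro c hc
    by_cases h : n = 0
    · subst h; simp [d3] at hc
    · rw [d3_pos n (by omega), List.mem_append] at hc
      rcases hc with hc | hc
      · exact ih _ (Nat.div_lt_self (by omega) (by norm_num)) c hc
      · simp at hc; subst hc; exact dchr_cases _

theorem d3_len_le (w : Nat) : ∀ n : Nat, n < 3^w → (d3 n []).length ≤ w := by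
  induction w with
  | zero => intro n h; interval_cases n; simp [d3]
  | succ w ih =>
    intro n h
    by_cases h0 : n = 0
    · subst h0; simp [d3]
    · rw [d3_pos n (by omega)]
      have : n / 3 < 3^w := by
        rw [Nat.div_lt_iff_lt_mul (by norm_num)]
        calc n < 3^(w+1) := h
          _ = 3^w * 3 := by ring
      simp [ih _ this]

theorem leftpad_d3 (w : Nat) : ∀ n : Nat, n < 3^w → leftpad w (d3 n []) = padRev w n := by
  induction w with
  | zero => intro n h; interval_cases n; simp [d3, leftpad, padRev]
  | succ w ih =>
    intro n h
    by_cases h0 : n = 0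
    · subst h0
      simp [d3, leftpad, padRev_zero]
    · rw [d3_pos n (by omega), padRev]
      have hlt : n / 3 < 3^w := by
        rw [Nat.div_lt_iff_lt_mul (by norm_num)]
        calc n < 3^(w+1) := h
          _ = 3^w * 3 := by ring
      rw [← ih _ hlt]
      unfold leftpad
      simp only [List.length_append, List.length_singleton]
      have : w + 1 - ((d3 (n/3) []).length + 1) = w - (d3 (n/3) []).length := by omega
      rw [this, ← List.append_assoc]

theorem base3Go_acc (c : Nat) : ∀ (n k : Int) (acc : List Char),
    base3Go n k c acc = acc ++ base3Go n k c [] := by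
  induction c with
  | zero => intro n k acc; simp [base3Go]
  | succ c ih =>
    intro n k acc
    rw [base3Go, base3Go]
    split_ifs with h1 h2
    · rw [ih _ _ (acc ++ ['2']), ih _ _ ([] ++ ['2'])]; simp
    · rw [ih _ _ (acc ++ ['1']), ih _ _ ([] ++ ['1'])]; simp
    · rw [ih _ _ (acc ++ ['0']), ih _ _ ([] ++ ['0'])]; simp

theorem base3Go_padRev (m : Nat) : ∀ n : Nat, n < 3^m →
    base3Go (n:Int) ((m:Int)-1) m [] = padRev m n := by
  induction m with
  | zero => intro n h; interval_cases n; rfl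
  | succ m ih =>
    intro n h
    have hk : (((m:Int) + 1 - 1).toNat) = m := by omega
    have hp : (((3:Nat)^m : Nat) : Int) = (3:Int)^m := by push_cast; ring
    have hdm := Nat.div_add_mod n (3^m)
    have hpow : 3^(m+1) = 3 * 3^m := by ring
    have hppos : 0 < 3^m := Nat.pow_pos (by norm_num)
    rw [base3Go]
    push_cast [hk]
    split_ifs with h1 h2
    · -- top digit 2
      have h2n : 2 * 3^m ≤ n := by omega
      have hdiv : n / 3^m = 2 := by
        have h3 : n / 3^m < 3 := by rw [Nat.div_lt_iff_lt_mul hppos]; omega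
        have h4 : 2 ≤ n / 3^m := Nat.le_div_iff_mul_le hppos |>.mpr (by omega)
        omega
      have hmod : n % 3^m = n - 2 * 3^m := by rw [hdiv] at hdm; omega
      have hcast : (n:Int) - 2 * 3^m = ((n - 2 * 3^m : Nat) : Int) := by omega
      rw [base3Go_acc, hcast, show ((m:Int) + 1 - 1) - 1 = (m:Int) - 1 from by ring,
        ih _ (by omega), padRev_msb m n (by omega), hdiv, hmod]
      rfl
    · -- top digit 1
      have h1n : 3^m ≤ n := by omega
      have h2n : n < 2 * 3^m := by omega
      have hdiv : n / 3^m = 1 := by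
        have h3 : n / 3^m < 2 := by rw [Nat.div_lt_iff_lt_mul hppos]; omega
        have h4 : 1 ≤ n / 3^m := Nat.le_div_iff_mul_le hppos |>.mpr (by omega)
        omega
      have hmod : n % 3^m = n - 3^m := by rw [hdiv] at hdm; omega
      have hcast : (n:Int) - 3^m = ((n - 3^m : Nat) : Int) := by omega
      rw [base3Go_acc, hcast, show ((m:Int) + 1 - 1) - 1 = (m:Int) - 1 from by ring,
        ih _ (by omega), padRev_msb m n (by omega), hdiv, hmod]
      rfl
    · -- top digit 0
      have h0n : n < 3^m := by omega
      have hdiv : n / 3^m = 0 := Nat.div_eq_of_lt h0n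
      have hmod : n % 3^m = n := Nat.mod_eq_of_lt h0n
      rw [base3Go_acc, show ((m:Int) + 1 - 1) - 1 = (m:Int) - 1 from by ring,
        ih _ h0n, padRev_msb m n (by omega), hdiv, hmod]
      rfl

theorem findI_ge (n : Int) (i : Nat) : n ≤ (3:Int)^(base3FindI n i) := by
  fun_induction base3FindI n i with
  | case1 i h ih => exact ih
  | case2 i h => omega

theorem findI_low (n : Int) (i : Nat) :
    base3FindI n i = i ∨ (3:Int)^(base3FindI n i - 1) < n := by
  fun_induction base3FindI n i with
  | case1 i h ih =>
    rcases ih with he | hlt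
    · right; rw [he]; simpa using h
    · right; exact hlt
  | case2 i h => left; rfl

theorem slice2_cons (l : List Char) :
    PySem.List.slice ('0' :: 't' :: l) (some 2) none = l := by
  simp [PySem.List.slice]

theorem base3_eq (n : Int) : base3 n =
    base3Go n (if (3:Int)^(base3FindI n 0) ≠ n then ((base3FindI n 0 : Nat) : Int) - 1
               else ((base3FindI n 0 : Nat) : Int))
      ((if (3:Int)^(base3FindI n 0) ≠ n then ((base3FindI n 0 : Nat) : Int) - 1
        else ((base3FindI n 0 : Nat) : Int)) + 1).toNat ['0','t'] := rfl

theorem base3_slice (n : Nat) : ∃ w, PySem.List.slice (base3 (n:Int)) (some 2) none = padRev w n ∧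
    n < 3^w ∧ ∀ L : Nat, n < 3^L → w ≤ L := by
  by_cases h0 : n = 0
  · subst h0
    refine ⟨0, ?_, by norm_num, fun L _ => Nat.zero_le L⟩
    have h1 : base3FindI (0:Int) 0 = 0 := by rw [base3FindI]; norm_num
    simp only [Nat.cast_zero]
    rw [base3_eq, h1]
    norm_num [base3Go, padRev, slice2_cons]
  · have hpos : 0 < n := by omega
    have hc3 : ∀ m : Nat, (((3:Nat)^m : Nat) : Int) = (3:Int)^m := by intro m; push_cast; ring
    set r := base3FindI (n:Int) 0 with hr
    have hge : (n:Int) ≤ 3^r := findI_ge _ _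
    have hlow := findI_low (n:Int) 0
    rw [← hr] at hlow
    by_cases heq : (3:Int)^r = (n:Int)
    · have hn3 : (3:Nat)^r = n := by exact_mod_cast (hc3 r).trans heq
      have hsucc : (3:Nat)^r < 3^(r+1) := Nat.pow_lt_pow_succ (by norm_num)
      refine ⟨r+1, ?_, by omega, ?_⟩
      · rw [base3_eq, ← hr, if_neg (not_ne_iff.mpr heq),
          show ((r:Nat):Int) + 1 = (((r+1 : Nat) : Nat) : Int) from by push_cast; ring,
          Int.toNat_natCast,
          show ((r:Nat):Int) = (((r+1:Nat):Nat):Int) - 1 from by push_cast; ring,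
          base3Go_acc, base3Go_padRev (r+1) n (by omega)]
        simp [slice2_cons]
      · intro L hL
        have h1 : (3:Nat)^r < 3^L := by omega
        have := (Nat.pow_lt_pow_iff_right (by norm_num : 1 < 3)).mp h1
        omega
    · have hlt : (n:Int) < 3^r := lt_of_le_of_ne hge fun h => heq h.symm
      have hltn : n < 3^r := by have := hc3 r; omega
      have hr0 : r ≠ 0 := by
        intro h; rw [h] at hlt; norm_num at hlt; omega
      have h2 : (3:Int)^(r-1) < n := hlow.resolve_left hr0
      have h2n : (3:Nat)^(r-1) < n := by have := hc3 (r-1); omega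
      refine ⟨r, ?_, hltn, ?_⟩
      · rw [base3_eq, ← hr, if_pos heq,
          show ((r:Nat):Int) - 1 + 1 = ((r:Nat):Int) from by ring, Int.toNat_natCast,
          base3Go_acc, base3Go_padRev r n hltn]
        simp [slice2_cons]
      · intro L hL
        have h1 : (3:Nat)^(r-1) < 3^L := by omega
        have := (Nat.pow_lt_pow_iff_right (by norm_num : 1 < 3)).mp h1
        omega

theorem base3_width (L : Nat) :
    (PySem.List.slice (base3 ((3:Int)^L - 1)) (some 2) none).length = L := by
  have hpow : (0:Nat) < 3^L := Nat.pow_pos (by norm_num)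
  have hc3 : (((3:Nat)^L : Nat) : Int) = (3:Int)^L := by push_cast; ring
  have hcast : (3:Int)^L - 1 = ((3^L - 1 : Nat) : Int) := by omega
  rw [hcast]
  obtain ⟨w, hs, hnw, hmin⟩ := base3_slice (3^L - 1)
  rw [hs, padRev_length]
  have hw1 : w ≤ L := hmin L (by omega)
  have hw2 : L ≤ w := (Nat.pow_le_pow_iff_right (by norm_num : 1 < 3)).mp (by omega)
  omega

theorem elem3 (L n : Nat) (h : n < 3^L) :
    zero_padder (PySem.List.slice (base3 (n:Int)) (some 2) none)
      ((PySem.List.slice (base3 ((3:Int)^L - 1)) (some 2) none).length : Int)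
      = PySem.Chars.zfill (d3 n []) (L : Int) := by
  rw [base3_width L]
  obtain ⟨w, hs, hnw, hmin⟩ := base3_slice n
  rw [hs, zero_padder_eq, zfill_eq _ _ (d3_mem n)]
  simp only [Int.toNat_natCast]
  rw [← leftpad_d3 w n hnw, leftpad_leftpad _ (d3_len_le w n hnw) (hmin L h)]

theorem pyBinDigits_mem (n : Nat) : ∀ c ∈ pyBinDigits n, c = '0' ∨ c = '1' ∨ c = '2' := by
  fun_induction pyBinDigits n with
  | case1 => simp
  | case2 n ih =>
    intro c hc
    rw [List.mem_append] at hc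
    rcases hc with hc | hc
    · exact ih c hc
    · simp at hc; subst hc; split_ifs <;> simp

theorem pyBin_mem (n : Nat) : ∀ c ∈ pyBin n, c = '0' ∨ c = '1' ∨ c = '2' := by
  unfold pyBin
  split_ifs
  · simp
  · exact pyBinDigits_mem n

theorem pyBinDigits_pow_len (L : Nat) : (pyBinDigits (2^(L+1) - 1)).length = L + 1 := by
  induction L with
  | zero => norm_num [pyBinDigits]
  | succ L ih =>
    have h2 : 2 * 2^(L+1) = 2^(L+1+1) := by ring
    have h1 : (2:Nat) ≤ 2^(L+1) := Nat.le_self_pow (by omega) 2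
    rw [show 2^(L+1+1) - 1 = (2^(L+1+1) - 2) + 1 from by omega, pyBinDigits]
    have hd : ((2^(L+1+1) - 2) + 1) / 2 = 2^(L+1) - 1 := by omega
    have hm : ((2^(L+1+1) - 2) + 1) % 2 = 1 := by omega
    rw [hd, hm]
    simp [ih]

theorem pyBin_width (L : Nat) : (pyBin (2^L - 1)).length = max L 1 := by
  cases L with
  | zero => simp [pyBin]
  | succ L =>
    have h1 : (1:Nat) ≤ 2^(L+1) := Nat.one_le_two_pow
    unfold pyBin
    rw [if_neg (by have := Nat.one_lt_two_pow_iff (n := L+1); omega), pyBinDigits_pow_len]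
    omega

theorem elem2 (L n : Nat) (h : n < 2^L) :
    zero_padder (pyBin n) ((pyBin (2^L - 1)).length : Int) = PySem.Chars.zfill (pyBin n) (L:Int) := by
  rw [pyBin_width, zero_padder_eq, zfill_eq _ _ (pyBin_mem n)]
  simp only [Int.toNat_natCast]
  cases L with
  | zero =>
    have : n = 0 := by simpa using h
    subst this
    simp [pyBin, leftpad]
  | succ L => rw [Nat.max_eq_left (by omega)]

theorem valsLoop_two (upper : Int) (js : List Int) (acc : List String) :
    valsLoop 2 upper js acc = acc ++ js.map (fun j =>
      String.ofList (zero_padder (pyBin j.toNat) ((pyBin upper.toNat).length : Int))) := by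
  induction js generalizing acc with
  | nil => simp [valsLoop]
  | cons j js ih => rw [valsLoop, if_pos rfl, ih]; simp

theorem valsLoop_three (upper : Int) (js : List Int) (acc : List String) :
    valsLoop 3 upper js acc = acc ++ js.map (fun j =>
      String.ofList (zero_padder (PySem.List.slice (base3 j) (some 2) none)
        ((PySem.List.slice (base3 upper) (some 2) none).length : Int))) := by
  induction js generalizing acc with
  | nil => simp [valsLoop]
  | cons j js ih =>
    rw [valsLoop, if_neg (by norm_num), if_pos rfl, ih]
    simp

theorem vals_eq (length base : Int) : vals length base =
    valsLoop base (base ^ length.toNat - 1)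
      (PySem.List.pyRange 0 ((base ^ length.toNat - 1) + 1) 1) [] := rfl

-- Source B's digit loop coincides with the base-3 divmod canonical form d3 (enough fuel)
theorem dgen_three (n : Nat) : ∀ (f : Nat), n < f → ∀ s, dgen 3 f (n:Int) s = d3 n s := by
  induction n using Nat.strong_induction_on with
  | _ n ih =>
    intro f hf s
    match f, hf with
    | f+1, _ =>
      rw [dgen]
      by_cases h0 : n = 0
      · subst h0
        rw [show ((0:Nat):Int) = (0:Int) from rfl, if_pos rfl, d3]
        simp
      · have hfd : PySem.Int.floordiv (n:Int) 3 = ((n/3 : Nat) : Int) := by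
          exact_mod_cast PySem.Int.floordiv_natCast n 3
        have hmd : PySem.Int.mod (n:Int) 3 = ((n%3 : Nat) : Int) := by
          exact_mod_cast PySem.Int.mod_natCast n 3
        rw [if_neg (by exact_mod_cast h0), hfd, hmd, Int.toNat_natCast,
          ih (n/3) (Nat.div_lt_self (by omega) (by norm_num)) f (by
            have := Nat.div_lt_self (Nat.pos_of_ne_zero h0) (by norm_num : 1 < 3); omega)]
        conv_rhs => rw [d3, if_neg h0]
        have hds : dch (n % 3) = dchr (n % 3) := by
          have h3 : n % 3 = 0 ∨ n % 3 = 1 ∨ n % 3 = 2 := by omega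
          rcases h3 with h|h|h <;> rw [h] <;> decide
        rw [hds]
    | 0, hf => omega

-- Source B's digit loop coincides with bin(n)'s digits for base 2 (enough fuel)
theorem dgen_two (n : Nat) : ∀ (f : Nat), n < f → ∀ s,
    dgen 2 f (n:Int) s = if n = 0 then s else pyBinDigits n ++ s := by
  induction n using Nat.strong_induction_on with
  | _ n ih =>
    intro f hf s
    match f, hf with
    | f+1, _ =>
      rw [dgen]
      by_cases h0 : n = 0
      · subst h0; simp
      · have hfd : PySem.Int.floordiv (n:Int) 2 = ((n/2 : Nat) : Int) := by
          exact_mod_cast PySem.Int.floordiv_natCast n 2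
        have hmd : PySem.Int.mod (n:Int) 2 = ((n%2 : Nat) : Int) := by
          exact_mod_cast PySem.Int.mod_natCast n 2
        rw [if_neg (by exact_mod_cast h0), if_neg h0, hfd, hmd, Int.toNat_natCast,
          ih (n/2) (Nat.div_lt_self (by omega) (by norm_num)) f (by
            have := Nat.div_lt_self (Nat.pos_of_ne_zero h0) (by norm_num : 1 < 2); omega)]
        have hdig : dch (n % 2) = (if n % 2 = 1 then '1' else '0') := by
          have h2 : n % 2 = 0 ∨ n % 2 = 1 := by omega
          rcases h2 with h|h <;> rw [h] <;> decide
        conv_rhs =>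
          rw [show n = (n - 1) + 1 from by omega, pyBinDigits,
            show n - 1 + 1 = n from by omega]
        rw [hdig]
        by_cases hd : n / 2 = 0
        · have hn1 : n = 1 := by omega
          subst hn1
          norm_num [pyBinDigits]
        · rw [if_neg hd]
          simp
    | 0, hf => omega

-- the base-2 elements agree for widths >= 1 (the width-0 case is D_vals)
theorem elem2' (L n : Nat) (hL : 1 ≤ L) (h : n < 2^L) :
    zero_padder (pyBin n) ((pyBin (2^L - 1)).length : Int)
      = PySem.Chars.zfill (if n = 0 then [] else pyBinDigits n) (L:Int) := by
  rw [elem2 L n h]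
  by_cases h0 : n = 0
  · subst h0
    rw [if_pos rfl, zfill_eq _ _ (pyBin_mem 0), zfill_eq _ _ (by simp)]
    unfold pyBin leftpad
    rw [if_pos rfl]
    simp only [Int.toNat_natCast, List.length_singleton, List.length_nil, Nat.sub_zero,
      List.append_nil]
    rw [show L = (L-1) + 1 from by omega, List.replicate_succ']
    congr 1
  · rw [if_neg h0]
    unfold pyBin
    rw [if_neg h0]

-- evaluation at the difference witness (zero_padder/base3FindI are well-founded
-- recursions, so `decide` cannot reduce them; these two lemmas do it by rewriting)
theorem vals_at_witness : vals 0 2 = ["0"] := by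
  rw [vals_eq,
    show ((2:Int) ^ (0:Int).toNat - 1 + 1) = 1 from rfl,
    show PySem.List.pyRange 0 1 1 = [0] from by decide]
  simp only [valsLoop]
  rw [zero_padder_eq]
  decide

theorem vals_alt_at_witness : vals_alt 0 2 = [""] := by
  unfold vals_alt
  rw [show ((2:Int) ^ (0:Int).toNat) = 1 from rfl,
    show PySem.List.pyRange 0 1 1 = [0] from by decide]
  decide

-- ===== VERDICT (by name: the statements are the Claim_ definitions above) =====
theorem vals_spec : Claim_unchanged_vals := by
  unfold Claim_unchanged_vals
  intro length base _ hpre hnd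
  obtain ⟨hlen, hb⟩ := hpre
  unfold vals_alt
  rw [vals_eq]
  have hLrw : ((length.toNat : Nat) : Int) = length := Int.toNat_of_nonneg hlen
  set L := length.toNat with hL
  rcases hb with hb | hb | hb | hb
  · -- base = 2
    subst hb
    have hL1 : 1 ≤ L := by
      rcases Nat.eq_zero_or_pos L with h0 | h1
      · exfalso; exact hnd ⟨by omega, rfl⟩
      · omega
    rw [show (2:Int)^L - 1 + 1 = 2^L from by ring, valsLoop_two, List.nil_append]
    apply List.map_congr_left
    intro j hj
    rw [PySem.List.mem_pyRange_one] at hj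
    have hc2 : (((2:Nat)^L : Nat) : Int) = (2:Int)^L := by push_cast; ring
    have hup : ((2:Int)^L - 1).toNat = 2^L - 1 := by omega
    obtain ⟨m, rfl⟩ : ∃ m : Nat, j = (m:Int) := ⟨j.toNat, by omega⟩
    have hm2 : m < 2^L := by omega
    rw [hup, ← hLrw, Int.toNat_natCast, dgen_two m (m+1) (by omega), List.append_nil]
    exact congrArg String.ofList (elem2' L m hL1 hm2)
  · -- base = 3
    subst hb
    rw [show (3:Int)^L - 1 + 1 = 3^L from by ring, valsLoop_three, List.nil_append]
    apply List.map_congr_left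
    intro j hj
    rw [PySem.List.mem_pyRange_one] at hj
    have hc3 : (((3:Nat)^L : Nat) : Int) = (3:Int)^L := by push_cast; ring
    obtain ⟨m, rfl⟩ : ∃ m : Nat, j = (m:Int) := ⟨j.toNat, by omega⟩
    have hm3 : m < 3^L := by omega
    rw [Int.toNat_natCast, dgen_three m (m+1) (by omega), ← hLrw]
    exact congrArg String.ofList (elem3 L m hm3)
  · -- base = 0 with positive length: both ranges are empty
    obtain ⟨hb0, hl1⟩ := hb
    subst hb0
    have hz : (0:Int) ^ L = 0 := zero_pow (by omega)
    rw [show (0:Int)^L - 1 + 1 = (0:Int)^L from by ring,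
      PySem.List.pyRange_one_eq_nil (by omega)]
    simp [valsLoop]
  · -- negative base with odd length: base ** length < 0, both ranges are empty
    obtain ⟨hbn, hlo⟩ := hb
    have hodd : Odd L := by rw [Nat.odd_iff]; omega
    have hneg : base ^ L < 0 := hodd.pow_neg hbn
    rw [show base^L - 1 + 1 = base^L from by ring,
      PySem.List.pyRange_one_eq_nil (by omega)]
    simp [valsLoop]

theorem vals_changed : Claim_changed_vals := by
  unfold Claim_changed_vals
  exact ⟨by decide, by decide, by decide, vals_at_witness, vals_alt_at_witness, by decide⟩

theorem vals_tight : Claim_exact_vals := by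
  unfold Claim_exact_vals
  intro length base _ _ hd
  obtain ⟨h1, h2⟩ := hd
  subst h1; subst h2
  rw [vals_at_witness, vals_alt_at_witness]
  decide
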